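-- pv_equiv track=rewrite | github.com/CodysCodingCloud/helionet-nosql-db-sxploration | src/Neo4jInteraction.py | create_edge_batch_data
-- ===== SOURCE A (Python) =====
-- def create_edge_batch_data(data) -> dict:
--     edge_dict = {}
--     for row in data:
--         source = row[0]
--         edge = row[1]
--         target = row[2]
--         [source_label, source_id] = source.split("::")
--         [target_label, target_id] = target.split("::")
--         key = (source_label, target_label, edge)
--         elem_value = {"src": source_id, "tgt": target_id}
--
--         edge_dict.setdefault(key, [])
--         edge_dict[key].append(elem_value)
--     return edge_dict
-- ===== SOURCE B (Python) =====
-- def create_edge_batch_data(data) -> dict: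
--     parsed = []
--     for row in data:
--         [source_label, source_id] = row[0].split("::")
--         [target_label, target_id] = row[2].split("::")
--         parsed.append(((source_label, target_label, row[1]),
--                        {"src": source_id, "tgt": target_id}))
--     keys = dict.fromkeys(key for key, _ in parsed)
--     return {key: [value for k, value in parsed if k == key] for key in keys}
-- ===== Notes on version B (the rewrite author's own statement) =====
-- stated objective: alternative
-- what changed: B replaces A's single incremental dict-grouping pass (setdefault + in-place append per row) with a parse-once pass producing (key, value) pairs, an ordered key dedup via dict.fromkeys, and a per-key gather comprehension.
import Mathlib
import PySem

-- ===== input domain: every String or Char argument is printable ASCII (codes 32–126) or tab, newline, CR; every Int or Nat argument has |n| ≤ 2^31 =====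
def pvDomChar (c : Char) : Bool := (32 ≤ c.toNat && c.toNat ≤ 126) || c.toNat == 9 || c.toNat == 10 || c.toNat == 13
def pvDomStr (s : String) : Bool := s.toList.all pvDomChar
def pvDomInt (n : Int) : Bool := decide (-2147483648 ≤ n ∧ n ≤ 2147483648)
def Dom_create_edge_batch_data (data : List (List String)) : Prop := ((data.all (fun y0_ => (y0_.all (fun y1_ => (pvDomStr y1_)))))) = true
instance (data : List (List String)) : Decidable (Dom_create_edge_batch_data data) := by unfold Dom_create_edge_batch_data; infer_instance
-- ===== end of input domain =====

-- B groups the rows by a parse-once / dedup-keys / gather-per-key strategy instead of A's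
-- single incremental dict-grouping pass (objective: alternative, not faster).
-- Both ports share the row parser pvRowKV (both Pythons parse a row identically).

-- row ↦ (key [source_label, target_label, edge], value [("src", source_id), ("tgt", target_id)]);
-- none exactly where Python raises (short row, or a split not yielding exactly 2 parts)
def pvRowKV (row : List String) : Option (List String × List (String × String)) :=
  match PySem.List.pyGet? row 0, PySem.List.pyGet? row 1, PySem.List.pyGet? row 2 with
  | some source, some edge, some target =>
    match PySem.Str.split? source "::", PySem.Str.split? target "::" with
    | some [source_label, source_id], some [target_label, target_id] =>
        some ([source_label, target_label, edge], [("src", source_id), ("tgt", target_id)])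
    | _, _ => none
  | _, _, _ => none

-- ===== PORT A =====
def create_edge_batch_data (data : List (List String)) : List (List String × List (List (String × String))) :=
  (data.foldl (fun edge_dict row =>
      match pvRowKV row with
      | some kv => (edge_dict.setdefault kv.1 []).modify kv.1 [] (fun l => l ++ [kv.2])
      | none => edge_dict)
    PySem.Dict.empty).items

-- ===== PORT B =====
def create_edge_batch_data_alt (data : List (List String)) : List (List String × List (List (String × String))) :=
  let parsed := data.filterMap pvRowKV
  let keys := PySem.List.dedup (parsed.map (fun p => p.1))
  keys.map (fun key => (key, (parsed.filter (fun p => p.1 == key)).map (fun p => p.2)))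

-- ===== PRECONDITION & SPEC =====
-- Pre_ excludes exactly the rows on which Python A raises: a row with fewer than 3 entries
-- (IndexError) or whose source/target does not split on "::" into exactly 2 parts (ValueError).
def Pre_create_edge_batch_data (data : List (List String)) : Prop :=
  ∀ row ∈ data, 3 ≤ row.length ∧
    ((PySem.Str.split? (row.getD 0 "") "::").getD []).length = 2 ∧
    ((PySem.Str.split? (row.getD 2 "") "::").getD []).length = 2
instance (data : List (List String)) : Decidable (Pre_create_edge_batch_data data) := by
  unfold Pre_create_edge_batch_data; infer_instance

def pvWitness_create_edge_batch_data : List (List String) :=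
  [["A::1", "knows", "B::2"], ["A::3", "knows", "B::2"], ["A::1", "likes", "C::9"]]

def Spec_create_edge_batch_data (data : List (List String)) (out : List (List String × List (List (String × String)))) : Prop := out = create_edge_batch_data_alt data
instance (data : List (List String)) (out : List (List String × List (List (String × String)))) : Decidable (Spec_create_edge_batch_data data out) := by unfold Spec_create_edge_batch_data; infer_instance

-- ===== CLAIM (what is proved, stated in full; the proofs are below) =====
def Claim_equal_create_edge_batch_data : Prop := ∀ (data : List (List String)), Dom_create_edge_batch_data data → Pre_create_edge_batch_data data → Spec_create_edge_batch_data data (create_edge_batch_data data)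

-- ===== LEMMAS AND PROOFS =====

-- A's loop skips exactly the rows pvRowKV rejects: it is a fold over the filterMap
theorem pv_foldl_match_filterMap (l : List (List String))
    (init : PySem.Dict (List String) (List (List (String × String)))) :
    l.foldl (fun edge_dict row =>
        match pvRowKV row with
        | some kv => (edge_dict.setdefault kv.1 []).modify kv.1 [] (fun l => l ++ [kv.2])
        | none => edge_dict) init
      = (l.filterMap pvRowKV).foldl
          (fun d kv => (d.setdefault kv.1 []).modify kv.1 [] (fun l => l ++ [kv.2])) init := by
  induction l generalizing init with
  | nil => rfl
  | cons a t ih =>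
      cases h : pvRowKV a <;> simp [h, ih]

-- setdefault-then-append is the modify A's loop body amounts to
theorem pv_setdefault_modify {κ : Type} [BEq κ] [LawfulBEq κ]
    (d : PySem.Dict κ (List (List (String × String)))) (k : κ) (v : List (String × String)) :
    (d.setdefault k []).modify k [] (fun l => l ++ [v]) = d.modify k [] (fun l => l ++ [v]) := by
  by_cases h : d.contains k = true
  · rw [PySem.Dict.setdefault_of_contains d [] h]
  · rw [PySem.Dict.setdefault_of_not_contains d [] (by simpa using h)]
    simp [PySem.Dict.modify, PySem.Dict.getD_insert_self, PySem.Dict.insert_insert_self,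
      PySem.Dict.getD_of_not_contains d [] (by simpa using h)]

-- ===== VERDICT (by name: the statement is the Claim_ definition above) =====
theorem create_edge_batch_data_spec : Claim_equal_create_edge_batch_data := by
  intro data _ _
  show create_edge_batch_data data = create_edge_batch_data_alt data
  unfold create_edge_batch_data create_edge_batch_data_alt
  have h1 : (data.foldl (fun edge_dict row =>
      match pvRowKV row with
      | some kv => (edge_dict.setdefault kv.1 []).modify kv.1 [] (fun l => l ++ [kv.2])
      | none => edge_dict) PySem.Dict.empty)
      = ((data.filterMap pvRowKV).foldl
          (fun d kv => (d.setdefault kv.1 []).modify kv.1 [] (fun l => l ++ [kv.2]))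
          PySem.Dict.empty) :=
    pv_foldl_match_filterMap data PySem.Dict.empty
  rw [h1]
  set parsed := data.filterMap pvRowKV with hp
  have hstep : (fun (d : PySem.Dict (List String) (List (List (String × String))))
      (kv : List String × List (String × String)) =>
        (d.setdefault kv.1 []).modify kv.1 [] (fun l => l ++ [kv.2]))
      = fun d kv => d.modify kv.1 [] (fun l => l ++ [kv.2]) := by
    funext d kv; exact pv_setdefault_modify d kv.1 kv.2
  rw [hstep]
  have hnd : (parsed.foldl (fun d kv => d.modify kv.1 [] (fun l => l ++ [kv.2]))
      PySem.Dict.empty).keys.Nodup :=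
    PySem.Dict.nodup_keys_foldl_modify_key parsed (fun p => p.1) []
      (fun _ p l => l ++ [p.2]) PySem.Dict.empty (by simp)
  rw [PySem.Dict.items_eq_map_keys _ hnd []]
  rw [PySem.Dict.keys_foldl_modify_key parsed (fun p => p.1) []
      (fun _ p l => l ++ [p.2]) PySem.Dict.empty]
  simp only [PySem.List.dedup_eq_ofList, PySem.Dict.keys_empty]
  have hkeys : PySem.Set.update ([] : List (List String)) (parsed.map fun p => p.1)
      = PySem.Set.ofList (parsed.map fun p => p.1) := rfl
  rw [hkeys]
  apply List.map_congr_left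
  intro k _
  rw [PySem.Dict.getD_foldl_modify_append]
  simp
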